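-- pv_equiv track=rewrite | github.com/ZScomnet/Programmers | Bruteforce/brute_level1_test.py | solution
-- ===== SOURCE A (Python) =====
-- def solution(answers):
--     p1,p2,p3 = [1,2,3,4,5],[2,1,2,3,2,4,2,5],[3,3,1,1,2,2,4,4,5,5,]
--     score = [0,0,0]
--     for i in range(len(answers)):
--         if p1[i%5] == answers[i]:
--             score[0] += 1
--         if p2[i%8] == answers[i]:
--             score[1] += 1
--         if p3[i%10] == answers[i]:
--             score[2] += 1
--     answer = []
--     for i in range(len(score)):
--         if score[i] == max(score):
--             answer.append(i+1)
--
--     return answer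
-- ===== SOURCE B (Python) =====
-- def solution(answers):
--     patterns = [[1, 2, 3, 4, 5],
--                 [2, 1, 2, 3, 2, 4, 2, 5],
--                 [3, 3, 1, 1, 2, 2, 4, 4, 5, 5]]
--     # One pass builds a histogram keyed by (position mod 40, answer); 40 = lcm(5, 8, 10),
--     # so every pattern's score is then a fixed 40-term table-lookup sum.
--     hist = {}
--     for i, v in enumerate(answers):
--         key = (i % 40, v)
--         hist[key] = hist.get(key, 0) + 1
--     scores = [sum(hist.get((j, p[j % len(p)]), 0) for j in range(40)) for p in patterns]
--     best = max(scores)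
--     return [k + 1 for k, s in enumerate(scores) if s == best]
-- ===== Notes on version B (the rewrite author's own statement) =====
-- stated objective: alternative
-- what changed: B replaces A's per-index loop that compares each answer against three mod-indexed patterns by a histogram algorithm: one pass builds a dict keyed by (i mod 40, answers[i]) (40 = lcm(5,8,10)), each pattern's score is then a fixed 40-term table-lookup sum independent of the comparisons, and the winners are collected from max(scores) computed once.
import Mathlib
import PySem

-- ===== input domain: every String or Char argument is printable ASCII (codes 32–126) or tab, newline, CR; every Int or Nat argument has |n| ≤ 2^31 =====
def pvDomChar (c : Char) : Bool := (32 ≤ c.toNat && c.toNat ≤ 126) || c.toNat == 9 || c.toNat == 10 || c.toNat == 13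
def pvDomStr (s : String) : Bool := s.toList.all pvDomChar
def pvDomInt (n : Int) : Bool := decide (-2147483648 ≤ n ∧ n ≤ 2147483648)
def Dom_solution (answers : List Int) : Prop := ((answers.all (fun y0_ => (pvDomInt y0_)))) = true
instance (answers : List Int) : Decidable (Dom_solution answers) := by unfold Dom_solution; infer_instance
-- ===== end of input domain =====

-- B replaces A's per-index triple-comparison loop by a histogram keyed by (i mod 40, answer)
-- (40 = lcm of the pattern lengths) plus a fixed 40-term lookup sum per pattern; equal return
-- value proved for all inputs (alternative algorithm, same asymptotic cost).


-- ===== PORT A =====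
-- pyGetD indices are always in range here (i ∈ range(len(answers)), i % len(p) < len(p));
-- maxD's default is never used (score has three elements), matching Python's max(score).
def solution (answers : List Int) : List Int :=
  let p1 : List Int := [1, 2, 3, 4, 5]
  let p2 : List Int := [2, 1, 2, 3, 2, 4, 2, 5]
  let p3 : List Int := [3, 3, 1, 1, 2, 2, 4, 4, 5, 5]
  let score :=
    (PySem.List.pyRange 0 (answers.length : Int) 1).foldl
      (fun (s : Int × Int × Int) i =>
        ( if PySem.List.pyGetD p1 (PySem.Int.mod i 5) 0 == PySem.List.pyGetD answers i 0 then s.1 + 1 else s.1,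
          if PySem.List.pyGetD p2 (PySem.Int.mod i 8) 0 == PySem.List.pyGetD answers i 0 then s.2.1 + 1 else s.2.1,
          if PySem.List.pyGetD p3 (PySem.Int.mod i 10) 0 == PySem.List.pyGetD answers i 0 then s.2.2 + 1 else s.2.2 ))
      (0, 0, 0)
  let scoreL : List Int := [score.1, score.2.1, score.2.2]
  (PySem.List.pyRange 0 (scoreL.length : Int) 1).foldl
    (fun ans i =>
      if PySem.List.pyGetD scoreL i 0 == PySem.List.maxD scoreL id 0 then ans ++ [i + 1] else ans)
    []

-- ===== PORT B =====
-- hist.get(key,0)+1 / hist[key]=… is Dict.insert key (getD key 0 + 1); the generator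
-- sum(hist.get((j, p[j % len(p)]), 0) for j in range(40)) is the sum of the mapped range;
-- scores always has three elements so maxD's default is never used (Python's max(scores)).
-- B's histogram loop: hist = {}; for i, v in enumerate(answers): hist[(i%40, v)] = hist.get(..., 0) + 1
def histB (answers : List Int) : PySem.Dict (Int × Int) Int :=
  (PySem.List.enumerate answers).foldl
    (fun d e =>
      d.insert (PySem.Int.mod e.1 40, e.2)
        (d.getD (PySem.Int.mod e.1 40, e.2) 0 + 1))
    PySem.Dict.empty

def solution_alt (answers : List Int) : List Int :=
  let patterns : List (List Int) :=
    [[1, 2, 3, 4, 5], [2, 1, 2, 3, 2, 4, 2, 5], [3, 3, 1, 1, 2, 2, 4, 4, 5, 5]]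
  let hist := histB answers
  let scores :=
    patterns.map (fun p =>
      ((PySem.List.pyRange 0 40 1).map
        (fun j => hist.getD (j, PySem.List.pyGetD p (PySem.Int.mod j (p.length : Int)) 0) 0)).sum)
  let best := PySem.List.maxD scores id 0
  ((PySem.List.enumerate scores).filter (fun ks => ks.2 == best)).map (fun ks => ks.1 + 1)

-- ===== PRECONDITION & SPEC =====
def Spec_solution (answers : List Int) (out : List Int) : Prop := out = solution_alt answers
instance (answers : List Int) (out : List Int) : Decidable (Spec_solution answers out) := by unfold Spec_solution; infer_instance

-- ===== CLAIM (what is proved, stated in full; the proofs are below) =====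
def Claim_equal_solution : Prop := ∀ (answers : List Int), Dom_solution answers → Spec_solution answers (solution answers)

-- ===== LEMMAS AND PROOFS =====

-- A's loop state is a triple of independent counters: split the fold.
lemma foldl_triple (f g h : Int → Int → Int) (l : List Int) (a b c : Int) :
    l.foldl (fun s i => (f s.1 i, g s.2.1 i, h s.2.2 i)) (a, b, c)
      = (l.foldl f a, l.foldl g b, l.foldl h c) := by
  induction l generalizing a b c with
  | nil => rfl
  | cons x t ih => simpa using ih (f a x) (g b x) (h c x)

-- the indicator sum over a Nodup index list picks out the unique matching index
lemma sum_indicator_not_mem (g : Int → Int) (a b : Int) (js : List Int) (hmem : a ∉ js) :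
    (js.map (fun j => if ((a, b) : Int × Int) = (j, g j) then (1 : Int) else 0)).sum = 0 := by
  apply List.sum_eq_zero
  intro x hx
  rcases List.mem_map.mp hx with ⟨j', hj', hval⟩
  have hne : ¬ ((a, b) : Int × Int) = (j', g j') := by
    intro he
    have : a = j' := congrArg Prod.fst he
    exact hmem (this ▸ hj')
  rw [if_neg hne] at hval
  omega

lemma sum_indicator_mem (g : Int → Int) (a b : Int) :
    ∀ js : List Int, js.Nodup → a ∈ js →
    (js.map (fun j => if ((a, b) : Int × Int) = (j, g j) then (1 : Int) else 0)).sum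
      = if b = g a then 1 else 0 := by
  intro js
  induction js with
  | nil => intro _ h; simp at h
  | cons j t ih =>
    intro hnd hmem
    rcases List.nodup_cons.mp hnd with ⟨hjt, hndt⟩
    by_cases hja : a = j
    · subst hja
      simp only [List.map_cons, List.sum_cons, sum_indicator_not_mem g a b t hjt, add_zero]
      by_cases hbg : b = g a <;> simp [Prod.ext_iff, hbg]
    · have hmem' : a ∈ t := by
        rcases List.mem_cons.mp hmem with h | h
        · exact absurd h hja
        · exact h
      have hhead : (if ((a, b) : Int × Int) = (j, g j) then (1 : Int) else 0) = 0 := by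
        simp [Prod.ext_iff, hja]
      simp only [List.map_cons, List.sum_cons, hhead, zero_add]
      exact ih hndt hmem'

-- B's histogram lookup sum over the residue table equals a single match count:
-- each element contributes to exactly one table slot (its residue).
lemma sum_count_pairs {α : Type} (js : List Int) (hnd : js.Nodup)
    (r w : α → Int) (g : Int → Int) :
    ∀ l : List α, (∀ x ∈ l, r x ∈ js) →
    (js.map (fun j => (((l.map (fun x => (r x, w x))).count (j, g j) : Nat) : Int))).sum
      = ((l.countP (fun x => w x == g (r x)) : Nat) : Int) := by
  intro l
  induction l with
  | nil => intro _; simp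
  | cons x t ih =>
    intro hr
    have hstep : ∀ j : Int,
        (((((x :: t).map (fun y => (r y, w y))).count (j, g j) : Nat) : Int))
          = (((t.map (fun y => (r y, w y))).count (j, g j) : Nat) : Int)
            + (if ((r x, w x) : Int × Int) = (j, g j) then (1 : Int) else 0) := by
      intro j
      rw [List.map_cons, List.count_cons]
      by_cases h : ((r x, w x) : Int × Int) = (j, g j) <;> simp [h]
    calc (js.map (fun j => ((((x :: t).map (fun y => (r y, w y))).count (j, g j) : Nat) : Int))).sum
        = (js.map (fun j => (((t.map (fun y => (r y, w y))).count (j, g j) : Nat) : Int)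
              + (if ((r x, w x) : Int × Int) = (j, g j) then (1 : Int) else 0))).sum := by
          exact congrArg _ (List.map_congr_left (fun j _ => hstep j))
      _ = (js.map (fun j => (((t.map (fun y => (r y, w y))).count (j, g j) : Nat) : Int))).sum
            + (js.map (fun j => if ((r x, w x) : Int × Int) = (j, g j) then (1 : Int) else 0)).sum := by
          rw [← PySem.List.sum_map_add_int]
      _ = ((t.countP (fun y => w y == g (r y)) : Nat) : Int)
            + (if w x = g (r x) then 1 else 0) := by
          rw [ih (fun y hy => hr y (List.mem_cons_of_mem x hy)),
            sum_indicator_mem g (r x) (w x) js hnd (hr x (List.mem_cons_self ..))]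
      _ = (((x :: t).countP (fun y => w y == g (r y)) : Nat) : Int) := by
          rw [List.countP_cons]
          by_cases h : w x = g (r x) <;> simp [h]

-- selecting the best indices: same result whether built by index loop or enumerate comprehension
lemma final_eq (s1 s2 s3 m : Int) :
    (PySem.List.pyRange 0 3 1).foldl
      (fun ans i => if PySem.List.pyGetD [s1, s2, s3] i 0 == m then ans ++ [i + 1] else ans) []
    = ((PySem.List.enumerate [s1, s2, s3]).filter (fun is => is.2 == m)).map (fun is => is.1 + 1) := by
  rw [show PySem.List.pyRange 0 3 1 = [0, 1, 2] from by decide]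
  cases hb1 : (s1 == m) <;> cases hb2 : (s2 == m) <;> cases hb3 : (s3 == m) <;>
    simp [PySem.List.enumerate, PySem.List.pyGetD, PySem.List.pyGet?, PySem.List.pyIdx?,
      hb1, hb2, hb3, List.filter, List.foldl]

-- per pattern: A's counting loop equals B's 40-slot histogram lookup sum
lemma score_eq (p answers : List Int) (hdvd : p.length ∣ 40) :
    (PySem.List.pyRange 0 (answers.length : Int) 1).foldl
      (fun acc i => if PySem.List.pyGetD p (PySem.Int.mod i (p.length : Int)) 0
                        == PySem.List.pyGetD answers i 0 then acc + 1 else acc) 0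
    = ((PySem.List.pyRange 0 40 1).map
        (fun j =>
          ((histB answers).getD
            (j, PySem.List.pyGetD p (PySem.Int.mod j (p.length : Int)) 0) 0))).sum := by
  -- the histogram is the counter of the (residue, value) list
  have hhist : histB answers
      = PySem.Dict.counter ((PySem.List.enumerate answers).map
          (fun e => (PySem.Int.mod e.1 40, e.2))) := by
    rw [histB, ← PySem.Dict.foldl_insert_getD_add_one_eq_counter, List.foldl_map]
  rw [hhist]
  simp only [PySem.Dict.getD_counter]
  -- rewrite the (residue, value) list over Nat indices
  have hlst : ((PySem.List.enumerate answers).map (fun e => (PySem.Int.mod e.1 40, e.2)))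
      = (List.range answers.length).map
          (fun k => ((((k % 40 : Nat)) : Int), answers.getD k 0)) := by
    rw [PySem.List.enumerate_eq_map_pyRange (d := 0)]
    simp only [PySem.List.len]
    rw [PySem.List.pyRange_zero_nat, List.map_map, List.map_map]
    apply List.map_congr_left
    intro k _
    simp [Function.comp_def, PySem.List.pyGetD_natCast]
  rw [hlst]
  rw [sum_count_pairs (PySem.List.pyRange 0 40 1) (by decide)
        (fun k => (((k % 40 : Nat)) : Int)) (fun k => answers.getD k 0)
        (fun j => PySem.List.pyGetD p (PySem.Int.mod j (p.length : Int)) 0)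
        (List.range answers.length)
        (by
          intro k _
          show (((k % 40 : Nat)) : Int) ∈ PySem.List.pyRange 0 40 1
          rw [PySem.List.mem_pyRange_one]
          omega)]
  rw [PySem.List.foldl_if_add_one, zero_add, PySem.List.pyRange_zero_nat, List.countP_map]
  congr 1
  apply List.countP_congr
  intro k _
  simp only [Function.comp_def, PySem.Int.mod_natCast, Nat.mod_mod_of_dvd k hdvd,
    PySem.List.pyGetD_natCast]
  rw [Bool.beq_comm]

-- ===== VERDICT (by name: the statement is the Claim_ definition above) =====
theorem solution_spec : Claim_equal_solution := by
  intro answers _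
  unfold Spec_solution solution solution_alt
  dsimp only
  rw [show (fun (s : Int × Int × Int) (i : Int) =>
        ( if PySem.List.pyGetD [1, 2, 3, 4, 5] (PySem.Int.mod i 5) 0 == PySem.List.pyGetD answers i 0 then s.1 + 1 else s.1,
          if PySem.List.pyGetD [2, 1, 2, 3, 2, 4, 2, 5] (PySem.Int.mod i 8) 0 == PySem.List.pyGetD answers i 0 then s.2.1 + 1 else s.2.1,
          if PySem.List.pyGetD [3, 3, 1, 1, 2, 2, 4, 4, 5, 5] (PySem.Int.mod i 10) 0 == PySem.List.pyGetD answers i 0 then s.2.2 + 1 else s.2.2 ))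
      = (fun (s : Int × Int × Int) (i : Int) =>
          ((fun (x : Int) (i : Int) => if PySem.List.pyGetD [1, 2, 3, 4, 5] (PySem.Int.mod i 5) 0 == PySem.List.pyGetD answers i 0 then x + 1 else x) s.1 i,
           (fun (x : Int) (i : Int) => if PySem.List.pyGetD [2, 1, 2, 3, 2, 4, 2, 5] (PySem.Int.mod i 8) 0 == PySem.List.pyGetD answers i 0 then x + 1 else x) s.2.1 i,
           (fun (x : Int) (i : Int) => if PySem.List.pyGetD [3, 3, 1, 1, 2, 2, 4, 4, 5, 5] (PySem.Int.mod i 10) 0 == PySem.List.pyGetD answers i 0 then x + 1 else x) s.2.2 i)) from rfl]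
  rw [foldl_triple
    (fun (x : Int) (i : Int) => if PySem.List.pyGetD [1, 2, 3, 4, 5] (PySem.Int.mod i 5) 0 == PySem.List.pyGetD answers i 0 then x + 1 else x)
    (fun (x : Int) (i : Int) => if PySem.List.pyGetD [2, 1, 2, 3, 2, 4, 2, 5] (PySem.Int.mod i 8) 0 == PySem.List.pyGetD answers i 0 then x + 1 else x)
    (fun (x : Int) (i : Int) => if PySem.List.pyGetD [3, 3, 1, 1, 2, 2, 4, 4, 5, 5] (PySem.Int.mod i 10) 0 == PySem.List.pyGetD answers i 0 then x + 1 else x)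
    (PySem.List.pyRange 0 (answers.length : Int) 1) 0 0 0]
  have e1 := score_eq [1, 2, 3, 4, 5] answers (by decide)
  have e2 := score_eq [2, 1, 2, 3, 2, 4, 2, 5] answers (by decide)
  have e3 := score_eq [3, 3, 1, 1, 2, 2, 4, 4, 5, 5] answers (by decide)
  simp only [List.map_cons, List.map_nil]
  norm_num at e1 e2 e3 ⊢
  rw [e1, e2, e3]
  simpa using final_eq _ _ _ _
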